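-- pv_equiv track=rewrite | github.com/PhyloStar/OnlinePMI | utils.py | dict2binarynexus1
-- ===== SOURCE A (Python) =====
-- from collections import defaultdict
--
-- def dict2binarynexus1(d, ex_langs, langs):
--     binArr = []
--     x = defaultdict(lambda: defaultdict(int))
--     for lang, clusterID in d.items():
--         x[clusterID][lang] = 1
--
--     for clusterID in x.keys():
--         temp = []
--         for lang in langs:
--             if lang in ex_langs: temp.append(2)
--             else:
--                 temp += [x[clusterID][lang]]
--         binArr.append(temp)
--     return binArr
-- ===== SOURCE B (Python) =====
-- def dict2binarynexus1(d, ex_langs, langs):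
--     # Scatter instead of gather: one pass over d updates per-cluster rows
--     # (started from a precomputed 2/0 template); no intermediate
--     # clusterID->lang index and no per-cell lookup.
--     ex = set(ex_langs)
--     template = [2 if l in ex else 0 for l in langs]
--     rows = {}
--     for lang, clusterID in d.items():
--         row = rows.get(clusterID, template)
--         rows[clusterID] = [1 if l == lang and l not in ex else v
--                            for l, v in zip(langs, row)]
--     return list(rows.values())
-- ===== Notes on version B (the rewrite author's own statement) =====
-- stated objective: alternative
-- what changed: B is a scatter, not a gather: instead of A's two phases (build a clusterID->lang->1 defaultdict index, then for each cluster scan langs reading that index per cell), B precomputes one 2/0 template row and makes a single pass over d, rewriting the affected cluster's row at each entry; the output is the rows dict's values.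
import Mathlib
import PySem

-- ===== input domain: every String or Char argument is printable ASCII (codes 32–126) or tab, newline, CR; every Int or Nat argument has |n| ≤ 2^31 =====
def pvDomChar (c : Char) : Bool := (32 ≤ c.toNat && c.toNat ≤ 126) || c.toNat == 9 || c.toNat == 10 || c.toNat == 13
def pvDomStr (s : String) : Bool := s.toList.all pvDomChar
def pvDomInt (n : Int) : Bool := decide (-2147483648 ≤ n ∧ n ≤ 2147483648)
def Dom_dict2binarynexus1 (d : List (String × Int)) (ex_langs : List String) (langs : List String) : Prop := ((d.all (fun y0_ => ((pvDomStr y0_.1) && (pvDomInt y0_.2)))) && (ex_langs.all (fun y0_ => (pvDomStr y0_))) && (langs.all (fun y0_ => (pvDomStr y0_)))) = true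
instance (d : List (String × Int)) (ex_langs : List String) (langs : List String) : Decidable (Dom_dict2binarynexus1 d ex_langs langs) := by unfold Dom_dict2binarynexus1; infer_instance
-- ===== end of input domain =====

-- B replaces A's gather (build clusterID->lang->1 index, then read it per cell) by a
-- scatter: a single pass over d rewrites the affected cluster's row, started from a
-- precomputed 2/0 template (objective: alternative).

-- ===== PORT A =====
def dict2binarynexus1 (d : List (String × Int)) (ex_langs : List String) (langs : List String) : List (List Int) :=
  let x : PySem.Dict Int (PySem.Dict String Int) :=
    d.foldl (fun x p => x.insert p.2 ((x.getD p.2 PySem.Dict.empty).insert p.1 1)) PySem.Dict.empty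
  x.keys.foldl (fun binArr clusterID =>
    binArr ++ [langs.foldl (fun temp lang =>
      if lang ∈ ex_langs then temp ++ [2]
      else temp ++ [(x.getD clusterID PySem.Dict.empty).getD lang 0]) []]) []

-- ===== PORT B =====
-- '[1 if l == lang and l not in ex else v for l, v in zip(langs, row)]'
def pvRowUpd (ex_langs langs : List String) (lang : String) (row : List Int) : List Int :=
  (langs.zip row).map (fun q => if q.1 = lang ∧ q.1 ∉ PySem.Set.ofList ex_langs then 1 else q.2)

def dict2binarynexus1_alt (d : List (String × Int)) (ex_langs : List String) (langs : List String) : List (List Int) :=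
  let template : List Int := langs.map (fun l => if l ∈ PySem.Set.ofList ex_langs then 2 else 0)
  let rows : PySem.Dict Int (List Int) :=
    d.foldl (fun rows p => rows.insert p.2 (pvRowUpd ex_langs langs p.1 (rows.getD p.2 template))) PySem.Dict.empty
  rows.values

-- ===== PRECONDITION & SPEC =====
-- Pre_ excludes association lists whose language keys repeat: such a list does not
-- represent any Python dict (A's parameter d is a dict), so A is never called on them.
def Pre_dict2binarynexus1 (d : List (String × Int)) (ex_langs : List String) (langs : List String) : Prop :=
  (d.map Prod.fst).Nodup
instance (d : List (String × Int)) (ex_langs : List String) (langs : List String) : Decidable (Pre_dict2binarynexus1 d ex_langs langs) := by unfold Pre_dict2binarynexus1; infer_instance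
def pvWitness_dict2binarynexus1 : (List (String × Int)) × List String × List String :=
  ([("en", 1), ("de", 2), ("fr", 1)], ["de"], ["en", "de", "fr", "nl"])

def Spec_dict2binarynexus1 (d : List (String × Int)) (ex_langs : List String) (langs : List String) (out : List (List Int)) : Prop := out = dict2binarynexus1_alt d ex_langs langs
instance (d : List (String × Int)) (ex_langs : List String) (langs : List String) (out : List (List Int)) : Decidable (Spec_dict2binarynexus1 d ex_langs langs out) := by unfold Spec_dict2binarynexus1; infer_instance

-- ===== CLAIM (what is proved, stated in full; the proofs are below) =====
def Claim_equal_dict2binarynexus1 : Prop := ∀ (d : List (String × Int)) (ex_langs : List String) (langs : List String), Dom_dict2binarynexus1 d ex_langs langs → Pre_dict2binarynexus1 d ex_langs langs → Spec_dict2binarynexus1 d ex_langs langs (dict2binarynexus1 d ex_langs langs)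

-- ===== LEMMAS AND PROOFS =====

-- The common gather form both ports are reduced to: row c, cell l.
def gCell (d : List (String × Int)) (ex_langs : List String) (c : Int) (l : String) : Int :=
  if l ∈ ex_langs then 2
  else match (PySem.Dict.mk d).get? l with
       | some cv => if cv = c then 1 else 0
       | none => 0

def gather (d : List (String × Int)) (ex_langs langs : List String) : List (List Int) :=
  (PySem.List.dedup (d.map (fun p => p.2))).map (fun c => langs.map (gCell d ex_langs c))

-- A's append-accumulator loop over the key list is a map.
lemma foldl_singleton {A B : Type} (l : List A) (g : A -> B) :
    l.foldl (fun acc c => acc ++ [g c]) [] = l.map g := by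
  rw [PySem.List.foldl_append_singleton_eq_map]
  simp

-- A's inner row loop (two append branches) is a map of the branch value.
lemma foldl_if_append {A B : Type} (l : List A) (P : A -> Prop) [DecidablePred P]
    (a : B) (g : A -> B) :
    l.foldl (fun acc x => if P x then acc ++ [a] else acc ++ [g x]) []
      = l.map (fun x => if P x then a else g x) := by
  have h : (fun (acc : List B) x => if P x then acc ++ [a] else acc ++ [g x])
      = fun acc x => acc ++ [if P x then a else g x] := by
    funext acc x; split <;> rfl
  rw [h, PySem.List.foldl_append_singleton_eq_map]
  simp

-- The cell invariant of A's build loop: after folding d into the nested dict from any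
-- accumulator x0, the (cid, lang) cell reads 1 exactly when d's first match for lang is cid.
lemma cell_invariant (d : List (String × Int)) (hnd : (d.map Prod.fst).Nodup)
    (x0 : PySem.Dict Int (PySem.Dict String Int)) (cid : Int) (lang : String) :
    ((d.foldl (fun x p => x.insert p.2 ((x.getD p.2 PySem.Dict.empty).insert p.1 1)) x0).getD cid PySem.Dict.empty).getD lang 0
      = (if (PySem.Dict.mk d).get? lang = some cid then 1
         else (x0.getD cid PySem.Dict.empty).getD lang 0) := by
  induction d generalizing x0 with
  | nil => simp [PySem.Dict.get?]
  | cons p rest ih =>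
    obtain ⟨s, c⟩ := p
    simp only [List.map_cons, List.nodup_cons] at hnd
    rw [List.foldl_cons, ih hnd.2]
    rw [PySem.Dict.get?_mk_cons]
    by_cases hls : s = lang
    · subst hls
      have hnone : (PySem.Dict.mk rest).get? s = none := by
        rw [PySem.Dict.get?_eq_none_iff_not_mem_keys]
        simpa using hnd.1
      simp only [hnone, BEq.rfl, if_true, PySem.Dict.getD_insert]
      split_ifs <;> simp_all [PySem.Dict.getD_insert_self]
    · have hbe : (s == lang) = false := by simp [hls]
      simp only [hbe, Bool.false_eq_true, if_false, PySem.Dict.getD_insert]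
      split_ifs <;> simp_all [PySem.Dict.getD_insert, Ne.symm hls]

-- A's outer key order is the ordered dedup of d's values.
lemma keys_eq_dedup (d : List (String × Int)) :
    (d.foldl (fun x p => x.insert p.2 ((x.getD p.2 PySem.Dict.empty).insert p.1 1))
        (PySem.Dict.empty : PySem.Dict Int (PySem.Dict String Int))).keys
      = PySem.List.dedup (d.map (fun p => p.2)) := by
  rw [PySem.Dict.keys_foldl_insert_key d (fun p => p.2)
        (fun x p => (x.getD p.2 PySem.Dict.empty).insert p.1 1) PySem.Dict.empty]
  simp [PySem.Dict.keys_empty, PySem.Set.update, PySem.Set.ofList_eq_foldl,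
        PySem.List.dedup_eq_ofList]

-- A equals the gather form.
lemma a_eq_gather (d : List (String × Int)) (ex_langs langs : List String)
    (hpre : (d.map Prod.fst).Nodup) :
    dict2binarynexus1 d ex_langs langs = gather d ex_langs langs := by
  unfold dict2binarynexus1 gather
  simp only []
  rw [keys_eq_dedup d]
  refine (foldl_singleton _ _).trans ?_
  refine List.map_congr_left ?_
  intro cid _
  refine (foldl_if_append langs (fun lang => lang ∈ ex_langs) 2 _).trans ?_
  refine List.map_congr_left ?_
  intro lang _
  unfold gCell
  by_cases hex : lang ∈ ex_langs
  · simp [hex]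
  · simp only [hex, if_false]
    rw [cell_invariant d hpre PySem.Dict.empty cid lang]
    cases hq : (PySem.Dict.mk d).get? lang with
    | none => simp [PySem.Dict.getD_empty]
    | some cv =>
      by_cases hcv : cv = cid
      · subst hcv; simp
      · simp [hcv, PySem.Dict.getD_empty]

-- ===== B-side lemmas =====

-- B's step function.
def bStep (ex_langs langs : List String) (template : List Int)
    (rows : PySem.Dict Int (List Int)) (p : String × Int) : PySem.Dict Int (List Int) :=
  rows.insert p.2 (pvRowUpd ex_langs langs p.1 (rows.getD p.2 template))

lemma length_pvRowUpd (ex_langs langs : List String) (lang : String) (row : List Int)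
    (h : row.length = langs.length) :
    (pvRowUpd ex_langs langs lang row).length = langs.length := by
  simp [pvRowUpd, h]

-- Row lengths stay langs.length through B's fold.
lemma bfold_len (ex_langs langs : List String) (template : List Int)
    (d : List (String × Int)) (rows0 : PySem.Dict Int (List Int))
    (hlen : ∀ cid, (rows0.getD cid template).length = langs.length) (cid : Int) :
    ((d.foldl (bStep ex_langs langs template) rows0).getD cid template).length = langs.length := by
  induction d generalizing rows0 with
  | nil => exact hlen cid
  | cons p rest ih =>
    rw [List.foldl_cons]
    refine ih _ ?_
    intro c
    unfold bStep
    rw [PySem.Dict.getD_insert]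
    split_ifs with hc
    · exact length_pvRowUpd _ _ _ _ (hlen p.2)
    · exact hlen c

-- B's scatter invariant, cell-wise: after the fold, cell (cid, j) is 1 exactly when
-- d's unique entry for langs[j] maps it to cid and it is not excluded.
lemma bfold_cell (ex_langs langs : List String) (template : List Int)
    (d : List (String × Int)) (hnd : (d.map Prod.fst).Nodup)
    (rows0 : PySem.Dict Int (List Int))
    (hlen : ∀ cid, (rows0.getD cid template).length = langs.length)
    (cid : Int) (j : Nat) (l : String) (hl : langs[j]? = some l) :
    ((d.foldl (bStep ex_langs langs template) rows0).getD cid template).getD j 0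
      = (if (PySem.Dict.mk d).get? l = some cid ∧ l ∉ PySem.Set.ofList ex_langs then 1
         else (rows0.getD cid template).getD j 0) := by
  have hj : j < langs.length := by
    have := List.getElem?_eq_some_iff.mp hl
    exact this.1
  induction d generalizing rows0 with
  | nil => simp [PySem.Dict.get?]
  | cons p rest ih =>
    obtain ⟨s, c⟩ := p
    simp only [List.map_cons, List.nodup_cons] at hnd
    have hlen1 : ∀ c', ((bStep ex_langs langs template rows0 (s, c)).getD c' template).length = langs.length := by
      intro c'
      unfold bStep
      rw [PySem.Dict.getD_insert]
      split_ifs with hc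
      · exact length_pvRowUpd _ _ _ _ (hlen c)
      · exact hlen c'
    rw [List.foldl_cons, ih hnd.2 _ hlen1]
    rw [PySem.Dict.get?_mk_cons]
    have hlj : langs[j] = l := by
      have := List.getElem?_eq_some_iff.mp hl
      exact this.2
    have hrow : ∀ row : List Int, row.length = langs.length →
        (pvRowUpd ex_langs langs s row).getD j 0
          = (if l = s ∧ l ∉ PySem.Set.ofList ex_langs then 1 else row.getD j 0) := by
      intro row hr
      have hj2 : j < ((langs.zip row).map
          (fun q => if q.1 = s ∧ q.1 ∉ PySem.Set.ofList ex_langs then 1 else q.2)).length := by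
        simp [hr, hj]
      have hjr : j < row.length := by omega
      rw [pvRowUpd, List.getD_eq_getElem?_getD, List.getElem?_eq_getElem hj2, Option.getD_some]
      rw [List.getD_eq_getElem?_getD, List.getElem?_eq_getElem hjr, Option.getD_some]
      simp only [List.getElem_map, List.getElem_zip, hlj]
    have hbstep : ∀ c', (bStep ex_langs langs template rows0 (s, c)).getD c' template
        = if c' = c then pvRowUpd ex_langs langs s (rows0.getD c template)
          else rows0.getD c' template := by
      intro c'; simp [bStep, PySem.Dict.getD_insert]
    by_cases hls : s = l
    · have hnone : (PySem.Dict.mk rest).get? l = none := by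
        rw [PySem.Dict.get?_eq_none_iff_not_mem_keys]
        rw [hls] at hnd
        simpa using hnd.1
      have hbe : (s == l) = true := by simp [hls]
      rw [if_neg (by simp [hnone]), hbstep]
      simp only [hbe, if_true]
      by_cases hcid : cid = c
      · subst hcid
        rw [if_pos rfl, hrow _ (hlen cid)]
        have hle : l = s := hls.symm
        by_cases hex : l ∈ PySem.Set.ofList ex_langs
        · simp [hex]
        · simp [hle]
      · rw [if_neg hcid, if_neg (fun h => hcid ((Option.some_inj.mp h.1).symm))]
    · have hbe : (s == l) = false := by simp [hls]
      simp only [hbe, Bool.false_eq_true, if_false]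
      by_cases hC : (PySem.Dict.mk rest).get? l = some cid ∧ l ∉ PySem.Set.ofList ex_langs
      · rw [if_pos hC, if_pos hC]
      · rw [if_neg hC, if_neg hC, hbstep]
        by_cases hcid : cid = c
        · rw [if_pos hcid, hrow _ (hlen c), if_neg (fun h => hls h.1.symm), hcid]
        · rw [if_neg hcid]

-- B's row for cid equals the gather row.
lemma bfold_row (d : List (String × Int)) (ex_langs langs : List String)
    (hnd : (d.map Prod.fst).Nodup) (cid : Int) :
    ((d.foldl (bStep ex_langs langs (langs.map (fun l => if l ∈ PySem.Set.ofList ex_langs then 2 else 0)))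
        PySem.Dict.empty).getD cid (langs.map (fun l => if l ∈ PySem.Set.ofList ex_langs then 2 else 0)))
      = langs.map (gCell d ex_langs cid) := by
  set template : List Int := langs.map (fun l => if l ∈ PySem.Set.ofList ex_langs then 2 else 0) with htdef
  have ht : template.length = langs.length := by simp [htdef]
  have hlen0 : ∀ c, ((PySem.Dict.empty : PySem.Dict Int (List Int)).getD c template).length = langs.length := by
    intro c; simp [PySem.Dict.getD_empty, ht]
  apply List.ext_getElem
  · simp [bfold_len ex_langs langs template d PySem.Dict.empty hlen0 cid]
  · intro j hj1 hj2
    have hj : j < langs.length := by simpa using hj2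
    have hl : langs[j]? = some langs[j] := List.getElem?_eq_getElem hj
    have hcell := bfold_cell ex_langs langs template d hnd PySem.Dict.empty hlen0 cid j langs[j] hl
    rw [List.getD_eq_getElem?_getD, List.getElem?_eq_getElem hj1, Option.getD_some] at hcell
    rw [hcell]
    have htj : template[j]?.getD 0 = (if langs[j] ∈ PySem.Set.ofList ex_langs then 2 else 0) := by
      have hjt : j < template.length := by omega
      rw [List.getElem?_eq_getElem hjt, Option.getD_some]
      simp [htdef]
    simp only [List.getElem_map]
    unfold gCell
    by_cases hex : langs[j] ∈ ex_langs
    · have hx : langs[j] ∈ PySem.Set.ofList ex_langs := by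
        simpa [PySem.Set.mem_ofList] using hex
      simp [hex, hx, PySem.Dict.getD_empty, htj]
    · have hx : langs[j] ∉ PySem.Set.ofList ex_langs := by
        simpa [PySem.Set.mem_ofList] using hex
      cases hq : (PySem.Dict.mk d).get? langs[j] with
      | none => simp [hex, hx, PySem.Dict.getD_empty, htj]
      | some cv =>
        by_cases hcv : cv = cid
        · subst hcv; simp [hex, hx]
        · simp [hex, hx, hcv, PySem.Dict.getD_empty, htj]

-- B equals the gather form.
lemma b_eq_gather (d : List (String × Int)) (ex_langs langs : List String)
    (hpre : (d.map Prod.fst).Nodup) :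
    dict2binarynexus1_alt d ex_langs langs = gather d ex_langs langs := by
  unfold dict2binarynexus1_alt gather
  simp only []
  set template : List Int := langs.map (fun l => if l ∈ PySem.Set.ofList ex_langs then 2 else 0) with htdef
  have hstep : (fun rows p => PySem.Dict.insert rows p.2 (pvRowUpd ex_langs langs p.1 (rows.getD p.2 template)))
      = bStep ex_langs langs template := by
    funext rows p; rfl
  rw [hstep]
  have hkeys : (d.foldl (bStep ex_langs langs template) PySem.Dict.empty).keys
      = PySem.List.dedup (d.map (fun p => p.2)) := by
    rw [show bStep ex_langs langs template
          = (fun rows p => rows.insert p.2 (pvRowUpd ex_langs langs p.1 (rows.getD p.2 template))) from rfl]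
    rw [PySem.Dict.keys_foldl_insert_key d (fun p => p.2)
          (fun rows p => pvRowUpd ex_langs langs p.1 (rows.getD p.2 template)) PySem.Dict.empty]
    simp [PySem.Dict.keys_empty, PySem.Set.update, PySem.Set.ofList_eq_foldl,
          PySem.List.dedup_eq_ofList]
  have hnk : (d.foldl (bStep ex_langs langs template) PySem.Dict.empty).keys.Nodup := by
    exact PySem.Dict.nodup_keys_foldl_insert_key d (fun p => p.2)
      (fun rows p => pvRowUpd ex_langs langs p.1 (rows.getD p.2 template)) PySem.Dict.empty
      (by simp)
  rw [PySem.Dict.values_eq_map_keys _ hnk template, hkeys]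
  refine List.map_congr_left ?_
  intro cid _
  exact bfold_row d ex_langs langs hpre cid

-- ===== VERDICT (by name: the statement is the Claim_ definition above) =====
theorem dict2binarynexus1_spec : Claim_equal_dict2binarynexus1 := by
  intro d ex_langs langs _hdom hpre
  unfold Spec_dict2binarynexus1
  rw [a_eq_gather d ex_langs langs hpre, b_eq_gather d ex_langs langs hpre]
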